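-- pv_equiv track=rewrite | github.com/marcverhagen/corelex | creation/corelex.py | _create_basic_type_relations_summary
-- ===== SOURCE A (Python) =====
-- def _create_basic_type_relations_summary(bt_relations):
--     bt_relation_index = {}
--     for bt_relation in bt_relations:
--         pair = (bt_relation[0], bt_relation[2])
--         rel = bt_relation[1]
--         if pair not in bt_relation_index:
--             bt_relation_index[pair] = {}
--         bt_relation_index[pair][rel] = bt_relation_index[pair].get(rel, 0) + 1
--     return bt_relation_index
-- ===== SOURCE B (Python) =====
-- def _create_basic_type_relations_summary(bt_relations):
--     pairs = list(dict.fromkeys((r[0], r[2]) for r in bt_relations))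
--     return {
--         pair: {rel: sum(1 for r in bt_relations
--                         if (r[0], r[2]) == pair and r[1] == rel)
--                for rel in dict.fromkeys(r[1] for r in bt_relations
--                                         if (r[0], r[2]) == pair)}
--         for pair in pairs
--     }
-- ===== Notes on version B (the rewrite author's own statement) =====
-- stated objective: alternative
-- what changed: B drops A's single interleaved loop that incrementally updates a nested dict; instead it dedups the (first, third) pairs in order, and for each pair dedups its relations and counts each (pair, relation) combination with a comprehension.
import Mathlib
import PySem

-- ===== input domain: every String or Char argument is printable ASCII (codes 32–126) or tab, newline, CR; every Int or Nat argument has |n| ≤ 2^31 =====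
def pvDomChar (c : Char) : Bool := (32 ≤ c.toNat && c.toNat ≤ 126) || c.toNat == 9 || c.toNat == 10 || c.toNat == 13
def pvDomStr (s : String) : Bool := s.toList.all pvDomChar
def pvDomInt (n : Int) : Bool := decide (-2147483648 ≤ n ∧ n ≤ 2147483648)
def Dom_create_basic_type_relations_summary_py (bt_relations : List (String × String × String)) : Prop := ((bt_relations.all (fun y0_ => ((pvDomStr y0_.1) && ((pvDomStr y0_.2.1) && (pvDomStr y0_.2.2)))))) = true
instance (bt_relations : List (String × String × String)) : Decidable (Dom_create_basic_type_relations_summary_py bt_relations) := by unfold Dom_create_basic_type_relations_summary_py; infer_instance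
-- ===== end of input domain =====

-- B replaces A's single interleaved loop (incremental nested-dict updates) by an ordered dedup of the
-- (first, third) pairs and, per pair, an ordered dedup of its relations with a counting comprehension
-- (objective: alternative decomposition; no speed claim).

-- ===== PORT A =====
def create_basic_type_relations_summary_py (bt_relations : List (String × String × String)) :
    List (String × String × List (String × Int)) :=
  let idx : PySem.Dict (String × String) (PySem.Dict String Int) :=
    bt_relations.foldl (fun d r =>
      let d1 := if d.contains (r.1, r.2.2) then d else d.insert (r.1, r.2.2) PySem.Dict.empty
      let inner := d1.getD (r.1, r.2.2) PySem.Dict.empty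
      d1.insert (r.1, r.2.2) (inner.insert r.2.1 (inner.getD r.2.1 0 + 1))) PySem.Dict.empty
  idx.items.map (fun p => (p.1.1, p.1.2, p.2.items))

-- ===== PORT B =====
def create_basic_type_relations_summary_py_alt (bt_relations : List (String × String × String)) :
    List (String × String × List (String × Int)) :=
  let pairs := PySem.List.dedup (bt_relations.map (fun r => (r.1, r.2.2)))
  pairs.map (fun pair =>
    let rels := PySem.List.dedup ((bt_relations.filter (fun r => (r.1, r.2.2) == pair)).map (fun r => r.2.1))
    (pair.1, pair.2,
      rels.map (fun rel =>
        (rel, ((bt_relations.filter (fun r => (r.1, r.2.2) == pair && r.2.1 == rel)).length : Int)))))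

-- ===== PRECONDITION & SPEC =====
def Spec_create_basic_type_relations_summary_py (bt_relations : List (String × String × String)) (out : List (String × String × List (String × Int))) : Prop := out = create_basic_type_relations_summary_py_alt bt_relations
instance (bt_relations : List (String × String × String)) (out : List (String × String × List (String × Int))) : Decidable (Spec_create_basic_type_relations_summary_py bt_relations out) := by unfold Spec_create_basic_type_relations_summary_py; infer_instance

-- ===== CLAIM (what is proved, stated in full; the proofs are below) =====
def Claim_equal_create_basic_type_relations_summary_py : Prop := ∀ (bt_relations : List (String × String × String)), Dom_create_basic_type_relations_summary_py bt_relations → Spec_create_basic_type_relations_summary_py bt_relations (create_basic_type_relations_summary_py bt_relations)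

-- ===== LEMMAS AND PROOFS =====

-- the keyed view of the input: ((first, third), relation)
def pvX (bt_relations : List (String × String × String)) : List ((String × String) × String) :=
  bt_relations.map (fun r => ((r.1, r.2.2), r.2.1))

-- A's loop body, on the keyed view
def pvStepFn (d : PySem.Dict (String × String) (PySem.Dict String Int))
    (q : (String × String) × String) : PySem.Dict (String × String) (PySem.Dict String Int) :=
  let d1 := if d.contains q.1 then d else d.insert q.1 PySem.Dict.empty
  let inner := d1.getD q.1 PySem.Dict.empty
  d1.insert q.1 (inner.insert q.2 (inner.getD q.2 0 + 1))

-- the inner dict determined by the list of relations seen for one pair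
def pvMkInner (rl : List String) : PySem.Dict String Int :=
  PySem.Dict.mk ((PySem.List.dedup rl).map (fun rel => (rel, (rl.count rel : Int))))

-- the relations seen for pair k, in input order
def pvRL (X : List ((String × String) × String)) (k : String × String) : List String :=
  (X.filter (fun q => q.1 == k)).map (fun q => q.2)

-- the canonical value of the whole nested dict
def pvCanon (X : List ((String × String) × String)) :
    PySem.Dict (String × String) (PySem.Dict String Int) :=
  PySem.Dict.mk ((PySem.List.dedup (X.map (fun q => q.1))).map (fun k => (k, pvMkInner (pvRL X k))))

lemma pvDedup_append {α : Type} [BEq α] [LawfulBEq α] (xs : List α) (a : α) :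
    PySem.List.dedup (xs ++ [a]) =
      if a ∈ xs then PySem.List.dedup xs else PySem.List.dedup xs ++ [a] := by
  have h : PySem.List.dedup (xs ++ [a]) = PySem.Set.add (PySem.List.dedup xs) a := by
    simp [PySem.List.dedup, PySem.Set.ofList, List.foldl_append]
  rw [h]
  by_cases hm : a ∈ xs
  · simp [PySem.Set.add, PySem.Set.contains, hm]
  · simp [PySem.Set.add, PySem.Set.contains, hm]

lemma pvRL_append (X : List ((String × String) × String)) (q : (String × String) × String)
    (k : String × String) :
    pvRL (X ++ [q]) k = pvRL X k ++ (if q.1 = k then [q.2] else []) := by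
  by_cases h : q.1 = k <;> simp [pvRL, List.filter_append, h]

lemma pvMkInner_keys (rl : List String) : (pvMkInner rl).keys = PySem.List.dedup rl := by
  simp only [pvMkInner, PySem.Dict.keys]
  rw [List.map_map, show ((fun (x : String × Int) => x.1) ∘ fun rel => (rel, (rl.count rel : Int))) = id from rfl, List.map_id]

lemma pvMkInner_getD (rl : List String) (r : String) (hr : r ∈ rl) :
    (pvMkInner rl).getD r 0 = (rl.count r : Int) := by
  apply PySem.Dict.getD_of_mem_items
  · exact List.mem_map.mpr ⟨r, (PySem.List.mem_dedup rl r).mpr hr, rfl⟩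
  · rw [pvMkInner_keys]; exact PySem.List.nodup_dedup rl

lemma pvMkInner_bump (rl : List String) (r : String) :
    (pvMkInner rl).insert r ((pvMkInner rl).getD r 0 + 1) = pvMkInner (rl ++ [r]) := by
  apply PySem.Dict.ext
  by_cases hr : r ∈ rl
  · have hc : (pvMkInner rl).contains r = true := by
      rw [PySem.Dict.contains_iff_mem_keys, pvMkInner_keys, PySem.List.mem_dedup]; exact hr
    rw [PySem.Dict.items_insert_of_contains _ _ hc, pvMkInner_getD rl r hr]
    show _ = (pvMkInner (rl ++ [r])).items
    simp only [pvMkInner, List.map_map, pvDedup_append, hr, if_true]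
    apply List.map_congr_left
    intro rel hrel
    by_cases he : rel = r
    · subst he
      simp [List.count_append]
    · have hb : (rel == r) = false := beq_eq_false_iff_ne.mpr he
      have hrs : ¬ r = rel := fun h => he h.symm
      simp [List.count_append, hrs, he]
  · have hc : (pvMkInner rl).contains r = false := by
      rw [Bool.eq_false_iff, Ne, PySem.Dict.contains_iff_mem_keys, pvMkInner_keys, PySem.List.mem_dedup]
      exact hr
    rw [PySem.Dict.items_insert_of_not_contains _ _ hc, PySem.Dict.getD_of_not_contains _ _ hc]
    show _ = (pvMkInner (rl ++ [r])).items
    simp only [pvMkInner, pvDedup_append, hr, if_false, List.map_append]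
    congr 1
    · apply List.map_congr_left
      intro rel hrel
      have hne : rel ≠ r := by
        intro he; exact hr (by simpa [he] using (PySem.List.mem_dedup rl rel).mp hrel)
      simp [List.count_append, Ne.symm hne]
    · have h0 : rl.count r = 0 := List.count_eq_zero.mpr hr
      simp [List.count_append, h0]

lemma pvCanon_keys (X : List ((String × String) × String)) :
    (pvCanon X).keys = PySem.List.dedup (X.map (fun q => q.1)) := by
  simp only [pvCanon, PySem.Dict.keys]
  rw [List.map_map, show ((fun (x : (String × String) × PySem.Dict String Int) => x.1) ∘ fun k => (k, pvMkInner (pvRL X k))) = id from rfl, List.map_id]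

lemma pvCanon_contains (X : List ((String × String) × String)) (k : String × String) :
    (pvCanon X).contains k = true ↔ k ∈ X.map (fun q => q.1) := by
  rw [PySem.Dict.contains_iff_mem_keys, pvCanon_keys, PySem.List.mem_dedup]

lemma pvCanon_getD (X : List ((String × String) × String)) (k : String × String)
    (hk : k ∈ X.map (fun q => q.1)) :
    (pvCanon X).getD k PySem.Dict.empty = pvMkInner (pvRL X k) := by
  apply PySem.Dict.getD_of_mem_items
  · exact List.mem_map.mpr ⟨k, (PySem.List.mem_dedup _ k).mpr hk, rfl⟩
  · rw [pvCanon_keys]; exact PySem.List.nodup_dedup _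

lemma pvMain (X : List ((String × String) × String)) :
    X.foldl pvStepFn PySem.Dict.empty = pvCanon X := by
  induction X using List.reverseRecOn with
  | nil => rfl
  | append_singleton X q ih =>
    rw [List.foldl_append, List.foldl_cons, List.foldl_nil, ih]
    apply PySem.Dict.ext
    by_cases hk : q.1 ∈ X.map (fun e => e.1)
    · have hc : (pvCanon X).contains q.1 = true := (pvCanon_contains X q.1).mpr hk
      show (pvStepFn (pvCanon X) q).items = (pvCanon (X ++ [q])).items
      simp only [pvStepFn, hc, if_true]
      rw [pvCanon_getD X q.1 hk, pvMkInner_bump]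
      have hrl : pvRL X q.1 ++ [q.2] = pvRL (X ++ [q]) q.1 := by
        rw [pvRL_append]; simp
      rw [hrl, PySem.Dict.items_insert_of_contains _ _ hc]
      simp only [pvCanon, List.map_map, List.map_append, List.map_cons, List.map_nil]
      rw [pvDedup_append, if_pos hk]
      apply List.map_congr_left
      intro k hkd
      by_cases he : k = q.1
      · subst he; simp [Function.comp_apply]
      · have hb : (k == q.1) = false := beq_eq_false_iff_ne.mpr he
        simp only [Function.comp_apply, hb, Bool.false_eq_true, if_false]
        rw [pvRL_append, if_neg (Ne.symm he), List.append_nil]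
    · have hc : (pvCanon X).contains q.1 = false := by
        rw [Bool.eq_false_iff, Ne, pvCanon_contains]; exact hk
      show (pvStepFn (pvCanon X) q).items = (pvCanon (X ++ [q])).items
      simp only [pvStepFn, hc, Bool.false_eq_true, if_false]
      rw [PySem.Dict.getD_insert_self]
      have hrl0 : pvRL X q.1 = [] := by
        rw [pvRL, List.filter_eq_nil_iff.mpr, List.map_nil]
        intro p hp hb
        exact hk (List.mem_map.mpr ⟨p, hp, by simpa using hb⟩)
      have hv : PySem.Dict.empty.insert q.2 ((PySem.Dict.empty.getD q.2 0) + 1) =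
          pvMkInner (pvRL (X ++ [q]) q.1) := by
        rw [pvRL_append, if_pos rfl, hrl0, List.nil_append]
        apply PySem.Dict.ext
        rw [PySem.Dict.items_insert_of_not_contains _ _ (by simp)]
        simp [pvMkInner, PySem.List.dedup, PySem.Set.ofList, PySem.Set.add, PySem.Set.contains,
          PySem.Set.empty, PySem.Dict.empty, PySem.Dict.getD, PySem.Dict.get?]
      rw [hv]
      have hc1 : ((pvCanon X).insert q.1 PySem.Dict.empty).contains q.1 = true :=
        PySem.Dict.contains_insert_self _ _ _
      rw [PySem.Dict.items_insert_of_contains _ _ hc1,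
        PySem.Dict.items_insert_of_not_contains _ _ hc, List.map_append]
      show _ = (pvCanon (X ++ [q])).items
      simp only [pvCanon, List.map_map, List.map_append, List.map_cons, List.map_nil]
      rw [pvDedup_append, if_neg hk, List.map_append]
      congr 1
      · apply List.map_congr_left
        intro k hkd
        have he : k ≠ q.1 := by
          intro h; subst h
          exact hk ((PySem.List.mem_dedup _ _).mp hkd)
        have hb : (k == q.1) = false := beq_eq_false_iff_ne.mpr he
        simp only [Function.comp_apply, hb, Bool.false_eq_true, if_false]
        rw [pvRL_append, if_neg (Ne.symm he), List.append_nil]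
      · simp

lemma pvPortA (l : List (String × String × String)) :
    create_basic_type_relations_summary_py l =
      (pvCanon (pvX l)).items.map (fun p => (p.1.1, p.1.2, p.2.items)) := by
  rw [← pvMain]
  unfold create_basic_type_relations_summary_py pvX
  rw [List.foldl_map]
  rfl

lemma pvCount (l : List (String × String × String)) (pair : String × String) (rel : String) :
    (((l.filter (fun r => (r.1, r.2.2) == pair)).map (fun r => r.2.1)).count rel : Int)
      = ((l.filter (fun r => (r.1, r.2.2) == pair && r.2.1 == rel)).length : Int) := by
  rw [List.count, List.countP_map, List.countP_filter, List.countP_eq_length_filter]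
  congr 2
  apply List.filter_congr
  intro r _
  show (r.2.1 == rel && ((r.1, r.2.2) == pair)) = ((r.1, r.2.2) == pair && r.2.1 == rel)
  rw [Bool.and_comm]

lemma pvPortB (l : List (String × String × String)) :
    create_basic_type_relations_summary_py_alt l =
      (pvCanon (pvX l)).items.map (fun p => (p.1.1, p.1.2, p.2.items)) := by
  unfold create_basic_type_relations_summary_py_alt pvCanon pvX
  rw [List.map_map, List.map_map,
    show (((fun (q : (String × String) × String) => q.1) ∘ fun (r : String × String × String) => ((r.1, r.2.2), r.2.1))
      = fun (r : String × String × String) => (r.1, r.2.2)) from rfl]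
  apply List.map_congr_left
  intro pair hp
  show (pair.1, pair.2, _) = (pair.1, pair.2, (pvMkInner (pvRL (l.map fun r => ((r.1, r.2.2), r.2.1)) pair)).items)
  have hrl : pvRL (l.map fun r => ((r.1, r.2.2), r.2.1)) pair
      = (l.filter (fun r => (r.1, r.2.2) == pair)).map (fun r => r.2.1) := by
    rw [pvRL, List.filter_map, List.map_map]
    rfl
  rw [hrl]
  show _ = (pair.1, pair.2, (PySem.List.dedup _).map _)
  refine congrArg _ (congrArg _ ?_)
  apply List.map_congr_left
  intro rel _
  rw [← pvCount]

-- ===== VERDICT (by name: the statement is the Claim_ definition above) =====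
theorem create_basic_type_relations_summary_py_spec : Claim_equal_create_basic_type_relations_summary_py := by
  intro l _
  unfold Spec_create_basic_type_relations_summary_py
  rw [pvPortA, pvPortB]
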